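-- pv_equiv track=rewrite | github.com/alexandraback/datacollection | solutions_5669245564223488_0/Python/lliquid/B.py | validstr
-- ===== SOURCE A (Python) =====
-- def validstr(str):
--     ord = dict()
--     idx = -1
--     for a in list(str):
--         if a not in ord.keys():
--             idx += 1
--             ord[a] = idx
--         if a in ord.keys() and ord[a] != idx:
--             return False
--     return True
-- ===== SOURCE B (Python) =====
-- def validstr(str):
--     s = list(str)
--     runs = [a for a, p in zip(s, [None] + s) if p != a]
--     seen = set()
--     for k in runs:
--         if k in seen:
--             return False
--         seen.add(k)
--     return True
-- ===== Notes on version B (the rewrite author's own statement) =====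
-- stated objective: idiomatic
-- what changed: B first splits the string into maximal runs (zip with the shifted list keeps each run's first element) and then detects a repeated run key with a seen-set, instead of A's per-character loop maintaining a char-to-index dict and an incrementing counter.
import Mathlib
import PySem

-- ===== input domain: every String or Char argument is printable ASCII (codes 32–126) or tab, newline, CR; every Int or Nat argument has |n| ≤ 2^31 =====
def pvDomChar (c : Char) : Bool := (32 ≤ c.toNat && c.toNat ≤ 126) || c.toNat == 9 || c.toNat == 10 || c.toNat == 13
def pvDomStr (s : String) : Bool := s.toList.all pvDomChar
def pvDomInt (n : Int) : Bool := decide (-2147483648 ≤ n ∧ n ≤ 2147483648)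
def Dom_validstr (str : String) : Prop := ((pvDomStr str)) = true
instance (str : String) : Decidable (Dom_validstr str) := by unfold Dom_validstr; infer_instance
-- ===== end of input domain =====

-- B rewrites A's per-character dict/counter loop as: split into maximal runs, then detect a repeated run key with a seen-set (same values everywhere; no speed claim).

-- ===== PORT A =====
-- the loop of A: state = (ord dict, idx); 'ord[a]' is only read under the guard 'a in ord.keys()',
-- so 'getD a 0' is exact there
def validstrGoA : List Char → PySem.Dict Char Int → Int → Bool
  | [], _, _ => true
  | a :: rest, ord, idx =>
    let s := if PySem.Dict.contains ord a = false
             then (PySem.Dict.insert ord a (idx + 1), idx + 1) else (ord, idx)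
    if PySem.Dict.contains s.1 a = true ∧ PySem.Dict.getD s.1 a 0 ≠ s.2 then false
    else validstrGoA rest s.1 s.2

def validstr (str : String) : Bool :=
  validstrGoA str.toList PySem.Dict.empty (-1)

-- ===== PORT B =====
-- the 'for k in runs' loop of B
def validstrGoB : List Char → PySem.Set Char → Bool
  | [], _ => true
  | k :: rest, seen =>
    if PySem.Set.contains seen k = true then false
    else validstrGoB rest (PySem.Set.add seen k)

def validstr_alt (str : String) : Bool :=
  let s := str.toList
  let runs := (s.zip ((none : Option Char) :: s.map some)).filterMap
      (fun ap => if ap.2 ≠ some ap.1 then some ap.1 else none)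
  validstrGoB runs PySem.Set.empty

-- ===== PRECONDITION & SPEC =====
def Spec_validstr (str : String) (out : Bool) : Prop := out = validstr_alt str
instance (str : String) (out : Bool) : Decidable (Spec_validstr str out) := by unfold Spec_validstr; infer_instance

-- ===== CLAIM (what is proved, stated in full; the proofs are below) =====
def Claim_equal_validstr : Prop := ∀ (str : String), Dom_validstr str → Spec_validstr str (validstr str)

-- ===== LEMMAS AND PROOFS =====

-- the run keys of l given the character (if any) just before l
def validstrRuns : List Char → Option Char → List Char
  | [], _ => []
  | a :: t, prev => if some a = prev then validstrRuns t prev else a :: validstrRuns t (some a)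

theorem validstr_zip_eq_runs (l : List Char) (prev : Option Char) :
    (l.zip (prev :: l.map some)).filterMap
      (fun ap => if ap.2 ≠ some ap.1 then some ap.1 else none) = validstrRuns l prev := by
  induction l generalizing prev with
  | nil => rfl
  | cons a t ih =>
    simp only [List.map_cons, List.zip_cons_cons, List.filterMap_cons, validstrRuns]
    by_cases h : some a = prev
    · rw [if_pos h]
      simp only [← h, ne_eq, not_true_eq_false, if_false]
      simpa using ih (some a)
    · rw [if_neg h, if_pos (fun hh => h hh.symm)]
      exact congrArg (a :: ·) (ih (some a))

theorem validstr_goA_eq_goB (l : List Char) (ord : PySem.Dict Char Int) (idx : Int)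
    (prev : Option Char)
    (h1 : ∀ c v, ord.get? c = some v → (v = idx ↔ prev = some c))
    (h2 : ∀ c v, ord.get? c = some v → v ≤ idx)
    (h3 : ∀ p, prev = some p → ord.contains p = true) :
    validstrGoA l ord idx = validstrGoB (validstrRuns l prev) ord.keys := by
  induction l generalizing ord idx prev with
  | nil => cases prev <;> rfl
  | cons a t ih =>
    cases hcon : PySem.Dict.contains ord a with
    | true =>
      obtain ⟨v, hv⟩ : ∃ v, ord.get? a = some v := by
        rw [PySem.Dict.contains_eq_isSome_get?] at hcon
        exact Option.isSome_iff_exists.mp hcon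
      have hgd : ord.getD a 0 = v := PySem.Dict.getD_of_get?_eq_some ord 0 hv
      have hstep : validstrGoA (a :: t) ord idx =
          if ord.getD a 0 ≠ idx then false else validstrGoA t ord idx := by
        simp [validstrGoA, hcon]
      by_cases hp : prev = some a
      · have hvidx : v = idx := (h1 a v hv).mpr hp
        rw [hstep, if_neg (fun hh => hh (hgd.trans hvidx)),
          validstrRuns, if_pos hp.symm]
        rw [hp]
        exact ih ord idx (some a) (fun c w hw => by rw [h1 c w hw, hp])
          h2 (fun p hpp => by cases hpp; exact hcon)
      · have hvidx : v ≠ idx := fun hh => hp ((h1 a v hv).mp hh)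
        rw [hstep, if_pos (fun hh => hvidx (hgd.symm.trans hh)),
          validstrRuns, if_neg (fun hh => hp hh.symm), validstrGoB,
          if_pos (by simp [PySem.Set.contains,
            (PySem.Dict.contains_iff_mem_keys ord a).mp hcon])]
    | false =>
      have hnm : a ∉ ord.keys := fun hm =>
        by simp [(PySem.Dict.contains_iff_mem_keys ord a).mpr hm] at hcon
      have hpne : ¬ some a = prev := fun hh => by simp [h3 a hh.symm] at hcon
      have hstep : validstrGoA (a :: t) ord idx =
          validstrGoA t (ord.insert a (idx + 1)) (idx + 1) := by
        simp [validstrGoA, hcon, PySem.Dict.contains_insert_self,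
          PySem.Dict.getD_of_get?_eq_some _ 0 (PySem.Dict.get?_insert_self ord a (idx + 1))]
      rw [hstep]
      rw [validstrRuns, if_neg hpne, validstrGoB,
        if_neg (by simp [PySem.Set.contains]; exact fun hh => hnm (by simpa using hh))]
      have hkeys : (ord.insert a (idx+1)).keys = PySem.Set.add ord.keys a := by
        rw [PySem.Dict.keys_insert_of_not_contains ord (idx+1) hcon]
        simp [PySem.Set.add, PySem.Set.contains]
        intro hh
        exact absurd (by simpa using hh) hnm
      rw [← hkeys]
      refine ih (ord.insert a (idx+1)) (idx+1) (some a) ?_ ?_ ?_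
      · intro c w hw
        rw [PySem.Dict.get?_insert] at hw
        split at hw
        · cases hw; simp [*]
        · have := h2 c w hw
          constructor
          · intro hh; omega
          · intro hh
            cases hh
            simp_all
      · intro c w hw
        rw [PySem.Dict.get?_insert] at hw
        split at hw
        · cases hw; omega
        · have := h2 c w hw; omega
      · intro p hpp; cases hpp; exact PySem.Dict.contains_insert_self ord a (idx+1)

-- ===== VERDICT (by name: the statement is the Claim_ definition above) =====
theorem validstr_spec : Claim_equal_validstr := by
  intro str _
  unfold Spec_validstr validstr
  simp only [validstr_alt]
  rw [validstr_zip_eq_runs]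
  rw [validstr_goA_eq_goB str.toList PySem.Dict.empty (-1) none
    (by intro c v hv; simp [PySem.Dict.get?_empty] at hv)
    (by intro c v hv; simp [PySem.Dict.get?_empty] at hv)
    (by intro p hp; cases hp)]
  rw [PySem.Dict.keys_empty]
  rfl
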